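-- pv_equiv track=rewrite | github.com/JessicaSista/CDI | data_profiling_bdpel_entrega_v2 (1).py | _texto_tiene_subcadena_en_validos
-- ===== SOURCE A (Python) =====
-- def _texto_tiene_subcadena_en_validos(texto: str, valid: set[str]) -> bool:
--     """
--     Comprueba si alguna subsecuencia contigua de palabras (hasta 4) coincide con un género válido.
--
--     Sirve para \"science fiction\", \"romantic comedy\", etc.
--     """
--     texto = texto.strip().lower()
--     if not texto:
--         return False
--     if texto in valid:
--         return True
--     if len(texto) > 3 and texto.endswith("s") and not texto.endswith("ss"):
--         if texto[:-1] in valid: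
--             return True
--     words = texto.split()
--     n = len(words)
--     for i in range(n):
--         for j in range(i + 1, min(i + 5, n) + 1):
--             sub = " ".join(words[i:j])
--             if sub in valid:
--                 return True
--             if len(sub) > 3 and sub.endswith("s") and not sub.endswith("ss") and sub[:-1] in valid:
--                 return True
--     return False
-- ===== SOURCE B (Python) =====
-- def _texto_tiene_subcadena_en_validos(texto: str, valid: set[str]) -> bool:
--     """Inverted search: instead of enumerating every word window of `texto` and
--     testing membership, iterate over the `valid` genres and look each one (and
--     its pluralized form v+'s') up in the text: it matches if it equals the full
--     stripped text, or if it is a normalized string of 1..5 words occurring as a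
--     contiguous run in the text's word list."""
--     t = texto.strip().lower()
--     if not t:
--         return False
--     words = t.split()
--     n = len(words)
--
--     def occurs(vw):
--         k = len(vw)
--         if k < 1 or 5 < k:
--             return False
--         return any(words[i:i + k] == vw for i in range(n - k + 1))
--
--     def matches(v):
--         if v == t:
--             return True
--         vw = v.split()
--         return " ".join(vw) == v and occurs(vw)
--
--     for v in valid:
--         if matches(v):
--             return True
--         if len(v) >= 3 and not v.endswith("s") and matches(v + "s"):
--             return True
--     return False
-- ===== Notes on version B (the rewrite author's own statement) =====
-- stated objective: alternative
-- what changed: A enumerates every contiguous word window of the text and tests each (and its de-pluralized form) for set membership; B inverts the search: it iterates over the valid genres and looks each entry (and its pluralized v+'s' form) up in the text, checking whether it equals the full text or is a normalized 1..5-word string occurring as a run in the text's word list.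
import Mathlib
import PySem

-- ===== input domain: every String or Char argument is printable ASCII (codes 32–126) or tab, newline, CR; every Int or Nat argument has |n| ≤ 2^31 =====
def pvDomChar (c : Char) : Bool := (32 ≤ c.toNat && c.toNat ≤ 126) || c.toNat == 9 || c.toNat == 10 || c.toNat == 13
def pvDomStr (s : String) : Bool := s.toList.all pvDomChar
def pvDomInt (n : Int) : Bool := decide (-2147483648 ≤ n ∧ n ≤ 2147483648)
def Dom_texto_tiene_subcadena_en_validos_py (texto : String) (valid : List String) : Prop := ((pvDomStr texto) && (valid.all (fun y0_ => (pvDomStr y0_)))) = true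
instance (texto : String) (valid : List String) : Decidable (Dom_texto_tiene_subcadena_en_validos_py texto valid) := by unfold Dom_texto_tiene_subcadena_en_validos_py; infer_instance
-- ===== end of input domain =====

-- B inverts the search: instead of enumerating every word window of the text and testing set membership,
-- it iterates over the valid genres and looks each one (and its v+"s" plural form) up in the text's word list.

-- ===== PORT A =====
def texto_tiene_subcadena_en_validos_py (texto : String) (valid : List String) : Bool :=
  let t := PySem.Str.lower (PySem.Str.strip texto)
  if t = "" then false
  else if valid.contains t then true
  else if decide (3 < PySem.Str.len t) && PySem.Str.endswith t "s" && !PySem.Str.endswith t "ss"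
          && valid.contains (PySem.Str.slice t none (some (-1))) then true
  else
    let words := PySem.Str.split₀ t
    let n := words.length
    (PySem.List.pyRange 0 (n : Int) 1).any (fun i =>
      (PySem.List.pyRange (i + 1) (min (i + 5) (n : Int) + 1) 1).any (fun j =>
        let sub := PySem.Str.join " " (PySem.List.slice words (some i) (some j))
        valid.contains sub ||
          (decide (3 < PySem.Str.len sub) && PySem.Str.endswith sub "s" && !PySem.Str.endswith sub "ss"
            && valid.contains (PySem.Str.slice sub none (some (-1))))))

-- ===== PORT B =====
-- occurs(vw): does the word list vw (1..5 words) appear as a contiguous run in `words`?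
def altOccurs (words : List String) (vw : List String) : Bool :=
  if vw.length < 1 || 5 < vw.length then false
  else (PySem.List.pyRange 0 ((words.length : Int) - (vw.length : Int) + 1) 1).any
    (fun i => PySem.List.slice words (some i) (some (i + (vw.length : Int))) == vw)

-- matches(v): v is the full text, or a normalized 1..5-word string occurring as a run of words
def altMatches (t : String) (words : List String) (v : String) : Bool :=
  if v == t then true
  else PySem.Str.join " " (PySem.Str.split₀ v) == v && altOccurs words (PySem.Str.split₀ v)

def texto_tiene_subcadena_en_validos_py_alt (texto : String) (valid : List String) : Bool :=
  let t := PySem.Str.lower (PySem.Str.strip texto)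
  if t = "" then false
  else
    let words := PySem.Str.split₀ t
    valid.any (fun v =>
      altMatches t words v ||
        (decide (3 ≤ PySem.Str.len v) && !PySem.Str.endswith v "s" && altMatches t words (v ++ "s")))

-- ===== PRECONDITION & SPEC =====
def Spec_texto_tiene_subcadena_en_validos_py (texto : String) (valid : List String) (out : Bool) : Prop := out = texto_tiene_subcadena_en_validos_py_alt texto valid
instance (texto : String) (valid : List String) (out : Bool) : Decidable (Spec_texto_tiene_subcadena_en_validos_py texto valid out) := by unfold Spec_texto_tiene_subcadena_en_validos_py; infer_instance

-- ===== CLAIM (what is proved, stated in full; the proofs are below) =====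
def Claim_equal_texto_tiene_subcadena_en_validos_py : Prop := ∀ (texto : String) (valid : List String), Dom_texto_tiene_subcadena_en_validos_py texto valid → Spec_texto_tiene_subcadena_en_validos_py texto valid (texto_tiene_subcadena_en_validos_py texto valid)

-- ===== LEMMAS AND PROOFS =====

-- a word is "clean": nonempty and whitespace-free (what `str.split()` produces)
def CleanW (w : List Char) : Prop := w ≠ [] ∧ ∀ c ∈ w, PySem.Chars.isspace c = false

def CleanS (w : String) : Prop := CleanW w.toList

-- equation lemmas for split₀'s worker
theorem go_nil (cur acc) : PySem.Chars.split₀.go [] cur acc =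
    if cur.isEmpty then acc.reverse else (cur.reverse :: acc).reverse := rfl

theorem go_cons (c rest cur acc) : PySem.Chars.split₀.go (c :: rest) cur acc =
    if PySem.Chars.isspace c then
      (if cur.isEmpty then PySem.Chars.split₀.go rest [] acc
       else PySem.Chars.split₀.go rest [] (cur.reverse :: acc))
    else PySem.Chars.split₀.go rest (c :: cur) acc := rfl

-- every word split₀ produces is clean
theorem go_clean : ∀ (s cur acc : _), (∀ w ∈ acc, CleanW w) →
    (∀ c ∈ cur, PySem.Chars.isspace c = false) →
    ∀ w ∈ PySem.Chars.split₀.go s cur acc, CleanW w := by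
  intro s
  induction s with
  | nil =>
      intro cur acc hacc hcur w hw
      rw [go_nil] at hw
      by_cases h : cur.isEmpty
      · rw [if_pos h, List.mem_reverse] at hw; exact hacc w hw
      · rw [if_neg h, List.mem_reverse] at hw
        rcases List.mem_cons.mp hw with h1 | h1
        · subst h1
          refine ⟨by simpa [List.isEmpty_iff] using h, ?_⟩
          intro c hc; exact hcur c (List.mem_reverse.mp hc)
        · exact hacc w h1
  | cons c rest ih =>
      intro cur acc hacc hcur w hw
      rw [go_cons] at hw
      by_cases hs : PySem.Chars.isspace c
      · rw [if_pos hs] at hw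
        by_cases he : cur.isEmpty
        · rw [if_pos he] at hw
          exact ih [] acc hacc (by simp) w hw
        · rw [if_neg he] at hw
          refine ih [] (cur.reverse :: acc) ?_ (by simp) w hw
          intro u hu
          rcases List.mem_cons.mp hu with h1 | h1
          · subst h1
            refine ⟨by simpa [List.isEmpty_iff] using he, ?_⟩
            intro d hd; exact hcur d (List.mem_reverse.mp hd)
          · exact hacc u h1
      · rw [if_neg hs] at hw
        refine ih (c :: cur) acc hacc ?_ w hw
        intro d hd
        rcases List.mem_cons.mp hd with h1 | h1
        · subst h1; exact Bool.eq_false_iff.mpr hs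
        · exact hcur d h1

theorem split₀_clean (s : List Char) : ∀ w ∈ PySem.Chars.split₀ s, CleanW w :=
  go_clean s [] [] (by simp) (by simp)

theorem split₀S_clean (t : String) : ∀ w ∈ PySem.Str.split₀ t, CleanS w := by
  intro w hw
  unfold PySem.Str.split₀ at hw
  rcases List.mem_map.mp hw with ⟨w', hw', rfl⟩
  unfold CleanS
  rw [String.toList_ofList]
  exact split₀_clean t.toList w' hw'

-- consuming a clean word leaves it accumulated (reversed) in cur
theorem go_skip : ∀ (w : List Char), (∀ c ∈ w, PySem.Chars.isspace c = false) →
    ∀ (rest : List Char) (cur acc : _),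
      PySem.Chars.split₀.go (w ++ rest) cur acc = PySem.Chars.split₀.go rest (w.reverse ++ cur) acc := by
  intro w
  induction w with
  | nil => intro _ rest cur acc; simp
  | cons c cs ih =>
      intro h rest cur acc
      rw [List.cons_append, go_cons, if_neg (by simp [h c (by simp)]),
          ih (fun d hd => h d (List.mem_cons_of_mem c hd)) rest (c :: cur) acc]
      simp

-- split₀ ∘ (join " ") is the identity on lists of clean words
theorem go_join : ∀ (ws : List (List Char)), (∀ w ∈ ws, CleanW w) →
    ∀ acc, PySem.Chars.split₀.go (List.intercalate [' '] ws) [] acc = acc.reverse ++ ws := by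
  intro ws
  induction ws with
  | nil => intro _ acc; simp [List.intercalate, go_nil]
  | cons w tl ih =>
      intro h acc
      have hw : CleanW w := h w (by simp)
      cases tl with
      | nil =>
          have : List.intercalate [' '] [w] = w := by simp [List.intercalate]
          rw [this, ← List.append_nil w, go_skip w hw.2, go_nil]
          have hne : (w.reverse ++ ([] : List Char)).isEmpty = false := by
            simp [List.isEmpty_iff, hw.1]
          rw [hne]
          simp
      | cons w2 tl2 =>
          have : List.intercalate [' '] (w :: w2 :: tl2)
              = w ++ [' '] ++ List.intercalate [' '] (w2 :: tl2) := by
            simp [List.intercalate, List.intersperse]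
          rw [this, List.append_assoc, go_skip w hw.2, List.cons_append, List.nil_append,
              go_cons]
          have hsp : PySem.Chars.isspace ' ' = true := by decide
          rw [if_pos hsp]
          have hne : (w.reverse ++ ([] : List Char)).isEmpty = false := by
            simp [List.isEmpty_iff, hw.1]
          rw [hne]
          simp only [Bool.false_eq_true, if_false]
          rw [ih (fun u hu => h u (List.mem_cons_of_mem w hu)) _]
          simp [hw.1]

theorem split₀_join (ws : List (List Char)) (h : ∀ w ∈ ws, CleanW w) :
    PySem.Chars.split₀ (PySem.Chars.join [' '] ws) = ws := by
  unfold PySem.Chars.split₀ PySem.Chars.join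
  rw [go_join ws h []]
  simp

theorem split₀S_join (ws : List String) (h : ∀ w ∈ ws, CleanS w) :
    PySem.Str.split₀ (PySem.Str.join " " ws) = ws := by
  unfold PySem.Str.split₀
  rw [PySem.Str.toList_join]
  have hsep : (" " : String).toList = [' '] := rfl
  rw [hsep, split₀_join (ws.map String.toList) (by
    intro w hw
    rcases List.mem_map.mp hw with ⟨u, hu, rfl⟩
    exact h u hu)]
  rw [List.map_map]
  apply List.map_id''
  intro u; exact String.ofList_toList

-- the plural test on a candidate x, rephrased as a condition on the stripped form v
def SingFor (x v : String) : Prop :=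
  3 ≤ v.toList.length ∧ ¬ (['s'] <:+ v.toList) ∧ x = v ++ "s"

theorem append_s_toList (v : String) : (v ++ "s").toList = v.toList ++ ['s'] := by
  simp

theorem plural_iff (x v : String) :
    (3 < PySem.Str.len x ∧ PySem.Str.endswith x "s" = true ∧ ¬ (PySem.Str.endswith x "ss" = true)
      ∧ v = PySem.Str.slice x none (some (-1)))
    ↔ SingFor x v := by
  rw [PySem.Str.len_eq, PySem.Str.endswith_eq, PySem.Str.endswith_eq,
      PySem.Chars.endswith_iff, PySem.Chars.endswith_iff]
  have hs : ("s" : String).toList = ['s'] := rfl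
  have hss : ("ss" : String).toList = ['s', 's'] := rfl
  rw [hs, hss]
  unfold SingFor
  constructor
  · rintro ⟨h1, h2, h3, h4⟩
    rcases h2 with ⟨u, hu⟩
    have hvu : v.toList = u := by
      rw [← String.toList_inj, PySem.Str.slice_to_neg_one] at h4
      rw [h4, ← hu, List.dropLast_concat]
    refine ⟨?_, ?_, ?_⟩
    · rw [hvu]
      have : x.toList.length = u.length + 1 := by rw [← hu]; simp
      omega
    · intro hsuf
      rw [hvu] at hsuf
      rcases hsuf with ⟨p, hp⟩
      exact h3 ⟨p, by rw [← hu, ← hp]; simp⟩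
    · rw [← String.toList_inj, append_s_toList, hvu, hu]
  · rintro ⟨h1, h2, h3⟩
    subst h3
    rw [append_s_toList] at *
    refine ⟨by simp only [List.length_append, List.length_cons, List.length_nil]; push_cast; omega,
      ⟨v.toList, rfl⟩, ?_, ?_⟩
    · rintro ⟨p, hp⟩
      have h' : v.toList ++ ['s'] = (p ++ ['s']) ++ ['s'] := by rw [← hp]; simp
      exact h2 ⟨p, (List.append_cancel_right h').symm⟩
    · rw [← String.toList_inj, PySem.Str.slice_to_neg_one, append_s_toList,
          List.dropLast_concat]

-- x occurs as a window: 1..5 consecutive words of `words`, joined with single spaces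
def IsWin (words : List String) (x : String) : Prop :=
  ∃ i k, 1 ≤ k ∧ k ≤ 5 ∧ i + k ≤ words.length ∧
    x = PySem.Str.join " " ((words.drop i).take k)

-- A's per-candidate boolean check (membership, or plural-stripped membership)
def pvCheckB (valid : List String) (s : String) : Bool :=
  valid.contains s ||
    (decide (3 < PySem.Str.len s) && PySem.Str.endswith s "s" && !PySem.Str.endswith s "ss"
      && valid.contains (PySem.Str.slice s none (some (-1))))

-- A's double loop hits exactly the windows
theorem Aloop_iff (words : List String) (f : String → Bool) :
    ((PySem.List.pyRange 0 (words.length : Int) 1).any (fun i =>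
      (PySem.List.pyRange (i + 1) (min (i + 5) ((words.length : Int)) + 1) 1).any (fun j =>
        f (PySem.Str.join " " (PySem.List.slice words (some i) (some j))))) = true)
    ↔ ∃ i k, 1 ≤ k ∧ k ≤ 5 ∧ i + k ≤ words.length ∧
        f (PySem.Str.join " " ((words.drop i).take k)) = true := by
  simp only [PySem.List.pyRange_one, List.any_map, List.any_eq_true, List.mem_map,
    List.mem_range, Function.comp_apply]
  constructor
  · rintro ⟨a, ha, m, hm, hf⟩
    refine ⟨a, m + 1, by omega, by omega, by omega, ?_⟩
    have harg0 : (0 : Int) + (a : Int) = ((a : Nat) : Int) := by push_cast; ring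
    have harg : (0 : Int) + (a : Int) + 1 + (m : Int) = ((a + 1 + m : Nat) : Int) := by
      push_cast; ring
    rw [harg, harg0, PySem.List.slice_natCast] at hf
    have h2 : a + 1 + m - a = m + 1 := by omega
    rw [h2] at hf
    exact hf
  · rintro ⟨i, k, h1, h5, hik, hf⟩
    refine ⟨i, by omega, k - 1, by omega, ?_⟩
    have harg0 : (0 : Int) + (i : Int) = ((i : Nat) : Int) := by push_cast; ring
    have harg : (0 : Int) + (i : Int) + 1 + ((k - 1 : Nat) : Int) = ((i + k : Nat) : Int) := by
      push_cast [Nat.cast_sub h1]; ring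
    rw [harg, harg0, PySem.List.slice_natCast]
    have h2 : i + k - i = k := by omega
    rw [h2]
    exact hf

-- B's occurrence test, characterized
theorem altOccurs_iff (words vw : List String) :
    altOccurs words vw = true
    ↔ (1 ≤ vw.length ∧ vw.length ≤ 5 ∧
        ∃ i, i + vw.length ≤ words.length ∧ (words.drop i).take vw.length = vw) := by
  unfold altOccurs
  by_cases hg : vw.length < 1 || 5 < vw.length
  · rw [if_pos hg]
    simp only [Bool.or_eq_true, decide_eq_true_iff] at hg
    constructor
    · intro h; exact absurd h (by simp)
    · rintro ⟨h1, h5, -⟩; omega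
  · rw [if_neg hg]
    simp only [Bool.or_eq_true, decide_eq_true_iff, not_or, not_lt] at hg
    rw [PySem.List.pyRange_one]
    simp only [List.any_map, List.any_eq_true, List.mem_range, Function.comp_apply, beq_iff_eq]
    constructor
    · rintro ⟨i, hi, hsl⟩
      have hik : i + vw.length ≤ words.length := by omega
      refine ⟨by omega, by omega, i, hik, ?_⟩
      have harg0 : (0 : Int) + (i : Int) = ((i : Nat) : Int) := by push_cast; ring
      have harg : ((i : Nat) : Int) + (vw.length : Int) = ((i + vw.length : Nat) : Int) := by
        push_cast; ring
      rw [harg0, harg, PySem.List.slice_natCast] at hsl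
      have : i + vw.length - i = vw.length := by omega
      rw [this] at hsl
      exact hsl
    · rintro ⟨h1, h5, i, hik, hw⟩
      refine ⟨i, by omega, ?_⟩
      have harg0 : (0 : Int) + (i : Int) = ((i : Nat) : Int) := by push_cast; ring
      have harg : ((i : Nat) : Int) + (vw.length : Int) = ((i + vw.length : Nat) : Int) := by
        push_cast; ring
      rw [harg0, harg, PySem.List.slice_natCast]
      have : i + vw.length - i = vw.length := by omega
      rw [this]
      exact hw

-- over the clean word list of t, B's normalize-and-search equals "x is a window"
theorem isWin_iff (t x : String) :
    IsWin (PySem.Str.split₀ t) x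
    ↔ (PySem.Str.join " " (PySem.Str.split₀ x) = x
        ∧ altOccurs (PySem.Str.split₀ t) (PySem.Str.split₀ x) = true) := by
  have hclean := split₀S_clean t
  constructor
  · rintro ⟨i, k, h1, h5, hik, hx⟩
    set ws := ((PySem.Str.split₀ t).drop i).take k with hws
    have hwsc : ∀ w ∈ ws, CleanS w := by
      intro w hw
      exact hclean w (List.mem_of_mem_drop (List.mem_of_mem_take hw))
    have hlen : ws.length = k := by
      rw [hws, List.length_take, List.length_drop]; omega
    have hsx : PySem.Str.split₀ x = ws := by rw [hx]; exact split₀S_join ws hwsc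
    refine ⟨by rw [hsx, ← hx], ?_⟩
    rw [altOccurs_iff, hsx, hlen]
    exact ⟨h1, h5, i, hik, rfl⟩
  · rintro ⟨hj, ho⟩
    rw [altOccurs_iff] at ho
    rcases ho with ⟨h1, h5, i, hik, hw⟩
    exact ⟨i, (PySem.Str.split₀ x).length, h1, h5, hik, by rw [hw, hj]⟩

-- B's matches(v)
theorem altMatches_iff (t x : String) :
    altMatches t (PySem.Str.split₀ t) x = true ↔ (x = t ∨ IsWin (PySem.Str.split₀ t) x) := by
  unfold altMatches
  by_cases h : (x == t) = true
  · rw [if_pos h]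
    simp only [beq_iff_eq] at h
    simp [h]
  · rw [if_neg h]
    simp only [beq_iff_eq] at h
    rw [Bool.and_eq_true, beq_iff_eq]
    constructor
    · rintro ⟨hj, ho⟩
      exact Or.inr ((isWin_iff t x).mpr ⟨hj, ho⟩)
    · rintro (h' | h')
      · exact absurd h' h
      · exact And.intro ((isWin_iff t x).mp h').1 ((isWin_iff t x).mp h').2

-- A's per-candidate check
def pvCheckP (valid : List String) (x : String) : Prop :=
  x ∈ valid ∨ ∃ v ∈ valid, SingFor x v

theorem pvCheck_iff (valid : List String) (x : String) :
    pvCheckB valid x = true ↔ pvCheckP valid x := by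
  unfold pvCheckB pvCheckP
  simp only [Bool.or_eq_true, Bool.and_eq_true, decide_eq_true_iff, Bool.not_eq_true',
    List.contains_iff_mem, Bool.eq_false_iff]
  constructor
  · rintro (h | ⟨⟨⟨h1, h2⟩, h3⟩, h4⟩)
    · exact Or.inl h
    · right
      refine ⟨PySem.Str.slice x none (some (-1)), h4, ?_⟩
      exact (plural_iff x _).mp ⟨h1, h2, fun hc => h3 hc, rfl⟩
  · rintro (h | ⟨v, hv, hsf⟩)
    · exact Or.inl h
    · right
      rcases (plural_iff x v).mpr hsf with ⟨h1, h2, h3, h4⟩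
      exact ⟨⟨⟨h1, h2⟩, fun hc => h3 hc⟩, by rw [← h4]; exact hv⟩

-- B's per-valid-entry test, as a proposition
def PBv (t v : String) : Prop :=
  (v = t ∨ IsWin (PySem.Str.split₀ t) v) ∨
  ((3 ≤ PySem.Str.len v ∧ PySem.Str.endswith v "s" = false) ∧
    (v ++ "s" = t ∨ IsWin (PySem.Str.split₀ t) (v ++ "s")))

theorem singOK_iff (v : String) :
    (3 ≤ PySem.Str.len v ∧ PySem.Str.endswith v "s" = false)
    ↔ (3 ≤ v.toList.length ∧ ¬ (['s'] <:+ v.toList)) := by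
  rw [PySem.Str.len_eq, PySem.Str.endswith_eq]
  have hs : ("s" : String).toList = ['s'] := rfl
  rw [hs, Bool.eq_false_iff]
  constructor
  · rintro ⟨h1, h2⟩
    exact ⟨by exact_mod_cast h1, fun hc => h2 ((PySem.Chars.endswith_iff _ _).mpr hc)⟩
  · rintro ⟨h1, h2⟩
    exact ⟨by exact_mod_cast h1, fun hc => h2 ((PySem.Chars.endswith_iff _ _).mp hc)⟩

theorem Bany_iff (t : String) (valid : List String) :
    (valid.any (fun v =>
      altMatches t (PySem.Str.split₀ t) v ||
        (decide (3 ≤ PySem.Str.len v) && !PySem.Str.endswith v "s"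
          && altMatches t (PySem.Str.split₀ t) (v ++ "s")))) = true
    ↔ ∃ v ∈ valid, PBv t v := by
  simp only [List.any_eq_true, Bool.or_eq_true, Bool.and_eq_true, decide_eq_true_iff,
    Bool.not_eq_true']
  apply exists_congr
  intro v
  apply and_congr_right
  intro _
  exact or_congr (altMatches_iff t v) (and_congr_right fun _ => altMatches_iff t (v ++ "s"))

-- the two enumeration orders hit the same pairs (candidate, valid entry)
theorem bridge (t : String) (valid : List String) :
    (pvCheckP valid t ∨ ∃ i k, 1 ≤ k ∧ k ≤ 5 ∧ i + k ≤ (PySem.Str.split₀ t).length ∧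
        pvCheckP valid (PySem.Str.join " " (((PySem.Str.split₀ t).drop i).take k)))
    ↔ ∃ v ∈ valid, PBv t v := by
  constructor
  · rintro (h | ⟨i, k, h1, h5, hik, hc⟩)
    · rcases h with hmem | ⟨v, hv, hl, hns, hx⟩
      · exact ⟨t, hmem, Or.inl (Or.inl rfl)⟩
      · exact ⟨v, hv, Or.inr ⟨(singOK_iff v).mpr ⟨hl, hns⟩, Or.inl hx.symm⟩⟩
    · rcases hc with hmem | ⟨v, hv, hl, hns, hx⟩
      · exact ⟨_, hmem, Or.inl (Or.inr ⟨i, k, h1, h5, hik, rfl⟩)⟩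
      · exact ⟨v, hv, Or.inr ⟨(singOK_iff v).mpr ⟨hl, hns⟩,
          Or.inr ⟨i, k, h1, h5, hik, hx.symm⟩⟩⟩
  · rintro ⟨v, hv, (hvt | hwin) | ⟨hok, (hst | hwin)⟩⟩
    · exact Or.inl (Or.inl (hvt ▸ hv))
    · rcases hwin with ⟨i, k, h1, h5, hik, hx⟩
      exact Or.inr ⟨i, k, h1, h5, hik, Or.inl (hx ▸ hv)⟩
    · rcases (singOK_iff v).mp hok with ⟨hl, hns⟩
      exact Or.inl (Or.inr ⟨v, hv, hl, hns, hst.symm⟩)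
    · rcases hwin with ⟨i, k, h1, h5, hik, hx⟩
      rcases (singOK_iff v).mp hok with ⟨hl, hns⟩
      exact Or.inr ⟨i, k, h1, h5, hik, Or.inr ⟨v, hv, hl, hns, hx.symm⟩⟩

-- ===== VERDICT (by name: the statement is the Claim_ definition above) =====
set_option maxHeartbeats 2000000 in
theorem texto_tiene_subcadena_en_validos_py_spec : Claim_equal_texto_tiene_subcadena_en_validos_py := by
  intro texto valid _
  unfold Spec_texto_tiene_subcadena_en_validos_py
  unfold texto_tiene_subcadena_en_validos_py texto_tiene_subcadena_en_validos_py_alt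
  dsimp only
  by_cases h0 : PySem.Str.lower (PySem.Str.strip texto) = ""
  · rw [if_pos h0, if_pos h0]
  · rw [if_neg h0, if_neg h0]
    simp only [Bool.if_true_left, Bool.decide_eq_true]
    rw [Bool.eq_iff_iff]
    constructor
    · intro hA
      simp only [Bool.or_eq_true] at hA
      apply (Bany_iff (PySem.Str.lower (PySem.Str.strip texto)) valid).mpr
      apply (bridge _ valid).mp
      rcases hA with h | h | h
      · exact Or.inl ((pvCheck_iff valid _).mp
          (by unfold pvCheckB; rw [Bool.or_eq_true]; exact Or.inl h))
      · exact Or.inl ((pvCheck_iff valid _).mp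
          (by unfold pvCheckB; rw [Bool.or_eq_true]; exact Or.inr h))
      · have h2 : ((PySem.List.pyRange 0
            ((PySem.Str.split₀ (PySem.Str.lower (PySem.Str.strip texto))).length : Int) 1).any
              (fun i => (PySem.List.pyRange (i + 1)
                (min (i + 5) (((PySem.Str.split₀ (PySem.Str.lower (PySem.Str.strip texto))).length : Int)) + 1) 1).any
                (fun j => pvCheckB valid (PySem.Str.join " "
                  (PySem.List.slice (PySem.Str.split₀ (PySem.Str.lower (PySem.Str.strip texto))) (some i) (some j)))))) = true := by
          unfold pvCheckB
          exact h
        rcases (Aloop_iff _ (pvCheckB valid)).mp h2 with ⟨i, k, h1, h5, hik, hf⟩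
        exact Or.inr ⟨i, k, h1, h5, hik, (pvCheck_iff valid _).mp hf⟩
    · intro hB
      have h' := (bridge _ valid).mpr ((Bany_iff _ valid).mp hB)
      simp only [Bool.or_eq_true]
      rcases h' with h | ⟨i, k, h1, h5, hik, hc⟩
      · have h2 := (pvCheck_iff valid _).mpr h
        unfold pvCheckB at h2
        rw [Bool.or_eq_true] at h2
        rcases h2 with h2 | h2
        · exact Or.inl h2
        · exact Or.inr (Or.inl h2)
      · right; right
        have h3 := (Aloop_iff (PySem.Str.split₀ (PySem.Str.lower (PySem.Str.strip texto)))
          (pvCheckB valid)).mpr ⟨i, k, h1, h5, hik, (pvCheck_iff valid _).mpr hc⟩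
        unfold pvCheckB at h3
        exact h3
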